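-- pv_equiv track=rewrite | github.com/nvdajp/nvdajpmiscdep | jtalk/alpha2mb.py | alpha2mb
-- ===== SOURCE A (Python) =====
-- def alpha2mb(s):
--     # 'abc' -> 'ａｂｃ'
--     from_table = "ABCDEFGHIJKLMNOPQRSTUVWXYZabcdefghijklmnopqrstuvwxyz"
--     to_table = "ＡＢＣＤＥＦＧＨＩＪＫＬＭＮＯＰＱＲＳＴＵＶＷＸＹＺａｂｃｄｅｆｇｈｉｊｋｌｍｎｏｐｑｒｓｔｕｖｗｘｙｚ"
--     result = ""
--     for ch in s:
--         pos = from_table.find(ch)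
--         if pos >= 0:
--             result += to_table[pos]
--     return result
-- ===== SOURCE B (Python) =====
-- def alpha2mb(s):
--     # arithmetic fullwidth conversion: ASCII letter + 0xFEE0, others dropped
--     out = []
--     for ch in s:
--         if 'A' <= ch <= 'Z' or 'a' <= ch <= 'z':
--             out.append(chr(ord(ch) + 0xFEE0))
--     return ''.join(out)
-- ===== Notes on version B (the rewrite author's own statement) =====
-- stated objective: idiomatic
-- what changed: Replaces the 52-character find/index translation tables with an explicit ASCII-letter bounds check and the constant code-point offset 0xFEE0, collecting characters in a list joined once.
import Mathlib
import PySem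

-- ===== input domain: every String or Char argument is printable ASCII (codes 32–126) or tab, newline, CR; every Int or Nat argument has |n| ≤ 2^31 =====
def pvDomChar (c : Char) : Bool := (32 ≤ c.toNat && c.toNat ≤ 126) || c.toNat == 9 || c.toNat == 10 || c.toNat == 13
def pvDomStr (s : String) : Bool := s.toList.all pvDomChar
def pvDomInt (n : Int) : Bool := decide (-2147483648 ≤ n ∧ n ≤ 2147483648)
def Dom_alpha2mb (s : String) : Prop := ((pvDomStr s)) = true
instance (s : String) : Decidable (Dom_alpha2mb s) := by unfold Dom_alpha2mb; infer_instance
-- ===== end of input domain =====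

-- B converts each ASCII letter arithmetically (code point + 0xFEE0) instead of A's 52-char find/index tables; same values, idiomatic rewrite.

-- ===== PORT A =====
def pvFromTable : List Char := "ABCDEFGHIJKLMNOPQRSTUVWXYZabcdefghijklmnopqrstuvwxyz".toList
def pvToTable : List Char := "ＡＢＣＤＥＦＧＨＩＪＫＬＭＮＯＰＱＲＳＴＵＶＷＸＹＺａｂｃｄｅｆｇｈｉｊｋｌｍｎｏｐｑｒｓｔｕｖｗｘｙｚ".toList

-- one loop iteration of A: pos = from_table.find(ch); if pos >= 0: result += to_table[pos]
def pvStepA (acc : List Char) (ch : Char) : List Char :=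
  if PySem.Chars.find pvFromTable [ch] ≥ 0 then
    match PySem.List.pyGet? pvToTable (PySem.Chars.find pvFromTable [ch]) with
    | some c => acc ++ [c]
    | none => acc   -- unreachable: find returns an index < 52 = to_table length (totality guard only)
  else acc

def alpha2mb (s : String) : String := String.ofList (s.toList.foldl pvStepA [])

-- ===== PORT B =====
-- one loop iteration of B: bounds check, then chr(ord(ch) + 0xFEE0)
def pvStepB (acc : List Char) (ch : Char) : List Char :=
  if ('A' ≤ ch ∧ ch ≤ 'Z') ∨ ('a' ≤ ch ∧ ch ≤ 'z') then acc ++ [Char.ofNat (ch.toNat + 0xFEE0)] else acc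

def alpha2mb_alt (s : String) : String := String.ofList (s.toList.foldl pvStepB [])

-- ===== PRECONDITION & SPEC =====
def Spec_alpha2mb (s : String) (out : String) : Prop := out = alpha2mb_alt s
instance (s : String) (out : String) : Decidable (Spec_alpha2mb s out) := by unfold Spec_alpha2mb; infer_instance

-- ===== CLAIM (what is proved, stated in full; the proofs are below) =====
def Claim_equal_alpha2mb : Prop := ∀ (s : String), Dom_alpha2mb s → Spec_alpha2mb s (alpha2mb s)

-- ===== LEMMAS AND PROOFS =====

-- both steps are "acc ++ emitted char(s)"
theorem pvStepA_append (acc : List Char) (ch : Char) : pvStepA acc ch = acc ++ pvStepA [] ch := by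
  unfold pvStepA
  split
  · cases PySem.List.pyGet? pvToTable (PySem.Chars.find pvFromTable [ch]) <;> simp
  · simp

theorem pvStepB_append (acc : List Char) (ch : Char) : pvStepB acc ch = acc ++ pvStepB [] ch := by
  unfold pvStepB
  split <;> simp

-- the two steps emit the same characters on every domain character (finite check over codes 0..126)
set_option maxRecDepth 4000 in
theorem pvStep_emit_eq : ∀ n < 127, pvStepA [] (Char.ofNat n) = pvStepB [] (Char.ofNat n) := by decide

theorem pvStep_eq (acc : List Char) (ch : Char) (h : pvDomChar ch = true) :
    pvStepA acc ch = pvStepB acc ch := by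
  have hn : ch.toNat < 127 := by
    unfold pvDomChar at h
    simp only [Bool.or_eq_true, Bool.and_eq_true, decide_eq_true_eq, beq_iff_eq] at h
    omega
  have hc : Char.ofNat ch.toNat = ch := Char.ofNat_toNat ch
  have := pvStep_emit_eq ch.toNat hn
  rw [hc] at this
  rw [pvStepA_append, pvStepB_append, this]

theorem pvFoldl_eq (l : List Char) (acc : List Char) (h : l.all pvDomChar = true) :
    l.foldl pvStepA acc = l.foldl pvStepB acc := by
  induction l generalizing acc with
  | nil => rfl
  | cons c t ih =>
    simp only [List.all_cons, Bool.and_eq_true] at h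
    simp only [List.foldl_cons, pvStep_eq acc c h.1]
    exact ih _ h.2

-- ===== VERDICT (by name: the statement is the Claim_ definition above) =====
theorem alpha2mb_spec : Claim_equal_alpha2mb := by
  intro s hd
  unfold Spec_alpha2mb alpha2mb alpha2mb_alt
  rw [pvFoldl_eq _ _ hd]
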